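-- pv_equiv track=rewrite | github.com/Ign555/SSD1306-convert-tool | src/SSD1306ImgCoverter.py | __create_c_array
-- ===== SOURCE A (Python) =====
-- N_METADATA = 3
--
-- def __create_c_array(image_data, array_name="img"):
--
--     h = image_data[1]
--     element_in_line = image_data[2]
--     n_element = h * element_in_line #Calculate the number of element in the exported array
--
--     c_array = '#include "SSD1306_img.h"\n\n'
--     c_array += f"const SSD1306_IMG {array_name}[{n_element + N_METADATA}] = " + "{\n\n" #Create the array header
--     c_array += f"0x{image_data[0]:02X}, 0x{image_data[1]:02X}, 0x{image_data[2]:02X},\n" #Append image information line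
--
--     for i in range(0, n_element):
--
--         c_array += f"0x{image_data[i + N_METADATA]:02X}" #Append the array with the byte in a C_array format
--
--         if i < n_element - 1: #If we are not on the last line
--             c_array += ", "
--
--         if (i + 1) % element_in_line == 0: #If we are on the last pixel of the image, back to line
--             c_array  += "\n"
--
--     c_array += "\n};" #Closing the array
--
--     return c_array
-- ===== SOURCE B (Python) =====
-- N_METADATA = 3
--
-- def __create_c_array(image_data, array_name="img"):
--     h = image_data[1]
--     w = image_data[2]
--     n_element = h * w
--     parts = ['#include "SSD1306_img.h"\n\n',
--              f"const SSD1306_IMG {array_name}[{n_element + N_METADATA}] = " + "{\n\n",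
--              f"0x{image_data[0]:02X}, 0x{image_data[1]:02X}, 0x{image_data[2]:02X},\n"]
--     if n_element > 0:
--         payload = image_data[N_METADATA:N_METADATA + n_element]
--         rows = [payload[r * w:(r + 1) * w] for r in range(h)]
--         body = ", \n".join(", ".join(f"0x{b:02X}" for b in row) for row in rows)
--         parts.append(body + "\n")
--     parts.append("\n};")
--     return "".join(parts)
-- ===== Notes on version B (the rewrite author's own statement) =====
-- stated objective: alternative
-- what changed: A appends byte by byte in one flat loop, deciding comma/newline from a running index and a signed modulo; B slices the payload once into h rows and joins each row's formatted bytes, joining rows with ', \n' and assembling the result from a list of parts.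
import Mathlib
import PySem

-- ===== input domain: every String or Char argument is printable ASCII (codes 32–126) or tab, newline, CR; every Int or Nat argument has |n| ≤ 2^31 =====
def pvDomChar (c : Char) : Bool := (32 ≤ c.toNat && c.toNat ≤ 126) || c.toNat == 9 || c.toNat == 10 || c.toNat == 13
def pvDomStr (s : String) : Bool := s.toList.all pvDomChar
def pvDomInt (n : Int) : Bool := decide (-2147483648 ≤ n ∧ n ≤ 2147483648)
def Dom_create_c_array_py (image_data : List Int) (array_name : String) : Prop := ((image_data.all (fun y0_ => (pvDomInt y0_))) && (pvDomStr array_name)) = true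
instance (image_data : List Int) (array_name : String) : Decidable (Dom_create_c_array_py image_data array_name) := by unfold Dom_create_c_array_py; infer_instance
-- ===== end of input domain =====

-- B replaces A's flat per-byte loop (with its running index/modulo separator logic) by slicing the
-- payload into rows once and joining each row — a different decomposition (objective: alternative).

-- shared formatting helper: Python's f"0x{v:02X}" (both A and B use this same f-string)
def pvHexDig (n : Nat) : Char := Char.ofNat (if n < 10 then 48 + n else 55 + n)

def pvHexNat (n : Nat) : List Char :=
  if h : n < 16 then [pvHexDig n]
  else pvHexNat (n / 16) ++ [pvHexDig (n % 16)]
  termination_by n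
  decreasing_by omega

def pvHexL (v : Int) : List Char :=
  '0' :: 'x' :: (if v < 0 then '-' :: pvHexNat v.natAbs
    else if v < 16 then '0' :: pvHexNat v.toNat else pvHexNat v.toNat)

def pvHex (v : Int) : String := String.ofList (pvHexL v)

-- ===== PORT A =====
def create_c_array_py (image_data : List Int) (array_name : String) : String :=
  let h := PySem.List.pyGetD image_data 1 0
  let element_in_line := PySem.List.pyGetD image_data 2 0
  let n_element := h * element_in_line
  let c_array := "#include \"SSD1306_img.h\"\n\n"
  let c_array := c_array ++ "const SSD1306_IMG " ++ array_name ++ "[" ++ PySem.Int.toStr (n_element + 3) ++ "] = " ++ "{\n\n"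
  let c_array := c_array ++ pvHex (PySem.List.pyGetD image_data 0 0) ++ ", " ++ pvHex (PySem.List.pyGetD image_data 1 0) ++ ", " ++ pvHex (PySem.List.pyGetD image_data 2 0) ++ ",\n"
  let c_array := (PySem.List.pyRange 0 n_element).foldl (fun acc i =>
      let a1 := acc ++ pvHex (PySem.List.pyGetD image_data (i + 3) 0)
      let a2 := if i < n_element - 1 then a1 ++ ", " else a1
      if PySem.Int.mod (i + 1) element_in_line = 0 then a2 ++ "\n" else a2) c_array
  c_array ++ "\n};"

-- ===== PORT B =====
def create_c_array_py_alt (image_data : List Int) (array_name : String) : String :=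
  let h := PySem.List.pyGetD image_data 1 0
  let w := PySem.List.pyGetD image_data 2 0
  let n_element := h * w
  let parts := ["#include \"SSD1306_img.h\"\n\n",
    "const SSD1306_IMG " ++ array_name ++ "[" ++ PySem.Int.toStr (n_element + 3) ++ "] = " ++ "{\n\n",
    pvHex (PySem.List.pyGetD image_data 0 0) ++ ", " ++ pvHex h ++ ", " ++ pvHex w ++ ",\n"]
  let parts := if 0 < n_element then
      let payload := PySem.List.slice image_data (some 3) (some (3 + n_element))
      let rows := (PySem.List.pyRange 0 h).map (fun r => PySem.List.slice payload (some (r * w)) (some ((r + 1) * w)))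
      let body := PySem.Str.join ", \n" (rows.map (fun row => PySem.Str.join ", " (row.map pvHex)))
      parts ++ [body ++ "\n"]
    else parts
  PySem.Str.join "" (parts ++ ["\n};"])

-- ===== PRECONDITION & SPEC =====
-- Pre_ excludes (a) inputs where A raises IndexError (fewer than 3 metadata entries, or a payload
-- shorter than h*w) and (b) the degenerate images with negative height AND negative width, where a
-- positive h*w makes A emit payload bytes with newline placement from Python's signed modulo — an
-- accident of A's flat loop that a row decomposition has no reason to reproduce.
def Pre_create_c_array_py (image_data : List Int) (array_name : String) : Prop :=
  3 ≤ image_data.length ∧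
  (0 < PySem.List.pyGetD image_data 1 0 * PySem.List.pyGetD image_data 2 0 →
    0 < PySem.List.pyGetD image_data 2 0 ∧
    (PySem.List.pyGetD image_data 1 0 * PySem.List.pyGetD image_data 2 0 + 3 : Int) ≤ image_data.length)
instance (image_data : List Int) (array_name : String) : Decidable (Pre_create_c_array_py image_data array_name) := by unfold Pre_create_c_array_py; infer_instance

def pvWitness_create_c_array_py : List Int × String := ([1, 2, 2, 10, 11, 12, 13], "img")

def Spec_create_c_array_py (image_data : List Int) (array_name : String) (out : String) : Prop := out = create_c_array_py_alt image_data array_name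
instance (image_data : List Int) (array_name : String) (out : String) : Decidable (Spec_create_c_array_py image_data array_name out) := by unfold Spec_create_c_array_py; infer_instance

-- ===== CLAIM (what is proved, stated in full; the proofs are below) =====
def Claim_equal_create_c_array_py : Prop := ∀ (image_data : List Int) (array_name : String), Dom_create_c_array_py image_data array_name → Pre_create_c_array_py image_data array_name → Spec_create_c_array_py image_data array_name (create_c_array_py image_data array_name)

-- ===== LEMMAS AND PROOFS =====

-- list-level row string: ", ".join of the formatted bytes of one row
def pvRowJ (row : List Int) : List Char := PySem.Chars.join [',', ' '] (row.map pvHexL)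

theorem pv_toList_comma : (", ").toList = [',', ' '] := rfl
theorem pv_toList_nl : ("\n").toList = ['\n'] := rfl

theorem pv_join_cons_ne (sep x : List Char) (l : List (List Char)) (h : l ≠ []) :
    PySem.Chars.join sep (x :: l) = x ++ sep ++ PySem.Chars.join sep l := by
  cases l with
  | nil => exact absurd rfl h
  | cons b t => exact PySem.Chars.join_cons_cons sep x b t

theorem pv_join_empty_sep (l : List (List Char)) : PySem.Chars.join [] l = l.flatten := by
  induction l with
  | nil => simp [PySem.Chars.join_nil]
  | cons x t ih =>
    cases t with
    | nil => simp [PySem.Chars.join_singleton]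
    | cons b r => rw [PySem.Chars.join_cons_cons]; simp only [List.flatten_cons] at ih ⊢; simp [ih]

theorem pv_getD_drop (l : List Int) (m i : Nat) (d : Int) : (l.drop m).getD i d = l.getD (m+i) d := by
  simp [List.getD_eq_getElem?_getD, List.getElem?_drop]

theorem pv_getD_take (l : List Int) (n i : Nat) (d : Int) (h : i < n) : (l.take n).getD i d = l.getD i d := by
  simp [List.getD_eq_getElem?_getD, h]

-- one row, elementwise: comma after every byte but the last (which gets `c`), newline after the last
theorem pv_rowCore (row : List Int) (c : List Char) (h : row ≠ []) :
    ((List.range row.length).map (fun i => pvHexL (row.getD i 0)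
        ++ (if i < row.length - 1 then [',', ' '] else c)
        ++ (if i = row.length - 1 then ['\n'] else []))).flatten
      = pvRowJ row ++ c ++ ['\n'] := by
  induction row with
  | nil => exact absurd rfl h
  | cons x t ih =>
    by_cases ht : t = []
    · subst ht; simp [pvRowJ, PySem.Chars.join_singleton]
    · have hlen : (x :: t).length = 1 + t.length := by simp [Nat.add_comm]
      rw [hlen, List.range_add]
      have htl : 0 < t.length := List.length_pos_iff.mpr ht
      simp only [List.map_append, List.flatten_append, List.map_map, Function.comp_def]
      have h0 : ((List.range 1).map (fun i => pvHexL ((x :: t).getD i 0)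
          ++ (if i < 1 + t.length - 1 then [',', ' '] else c)
          ++ (if i = 1 + t.length - 1 then ['\n'] else []))).flatten
          = pvHexL x ++ [',', ' '] := by
        simp only [List.range_one, List.map_cons, List.map_nil, List.flatten_cons,
          List.flatten_nil, List.getD_cons_zero, List.append_nil]
        rw [if_pos (by omega), if_neg (by omega)]
        simp
      rw [h0]
      have h1 : ∀ i ∈ List.range t.length,
          pvHexL ((x :: t).getD (1 + i) 0)
            ++ (if 1 + i < 1 + t.length - 1 then [',', ' '] else c)
            ++ (if 1 + i = 1 + t.length - 1 then ['\n'] else [])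
          = pvHexL (t.getD i 0)
            ++ (if i < t.length - 1 then [',', ' '] else c)
            ++ (if i = t.length - 1 then ['\n'] else []) := by
        intro i hi
        have e1 : (x :: t).getD (1 + i) 0 = t.getD i 0 := by
          rw [Nat.add_comm]; simp
        have e2 : (1 + i < 1 + t.length - 1) ↔ (i < t.length - 1) := by omega
        have e3 : (1 + i = 1 + t.length - 1) ↔ (i = t.length - 1) := by omega
        rw [e1, if_congr e2 rfl rfl, if_congr e3 rfl rfl]
      rw [List.map_congr_left h1, ih ht]
      have hj : pvRowJ (x :: t) = pvHexL x ++ [',', ' '] ++ pvRowJ t := by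
        unfold pvRowJ
        rw [List.map_cons, pv_join_cons_ne _ _ _ (by simpa using ht)]
      rw [hj]; simp

-- the whole payload: A's flat indexed pass equals the row-joined form
theorem pv_main (h' : Nat) : ∀ (w' : Nat), 0 < w' → ∀ (p : List Int), p.length = (h'+1) * w' →
    ((List.range ((h'+1) * w')).map (fun i => pvHexL (p.getD i 0)
        ++ (if i < (h'+1) * w' - 1 then [',', ' '] else [])
        ++ (if (i+1) % w' = 0 then ['\n'] else []))).flatten
      = PySem.Chars.join [',', ' ', '\n']
          ((List.range (h'+1)).map (fun r => pvRowJ ((p.drop (r * w')).take w'))) ++ ['\n'] := by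
  induction h' with
  | zero =>
    intro w' hw p hp
    have hp' : p.length = w' := by simpa using hp
    rw [show (0+1) * w' = p.length from by rw [hp']; ring]
    have hne : p ≠ [] := by
      intro he; rw [he] at hp'; simp at hp'; omega
    have hcongr : ∀ i ∈ List.range p.length,
        pvHexL (p.getD i 0)
          ++ (if i < p.length - 1 then [',', ' '] else [])
          ++ (if (i+1) % w' = 0 then ['\n'] else [])
        = pvHexL (p.getD i 0)
          ++ (if i < p.length - 1 then [',', ' '] else ([] : List Char))
          ++ (if i = p.length - 1 then ['\n'] else []) := by
      intro i hi
      have hiw : i < w' := by rw [← hp']; exact List.mem_range.mp hi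
      have e2 : ((i+1) % w' = 0) ↔ (i = p.length - 1) := by
        rw [hp']
        constructor
        · intro hm
          have := Nat.le_of_dvd (by omega) (Nat.dvd_of_mod_eq_zero hm); omega
        · intro he
          have hh : i + 1 = w' := by omega
          simp [hh]
      rw [if_congr e2 rfl rfl]
    rw [List.map_congr_left hcongr, pv_rowCore p [] hne]
    simp [PySem.Chars.join_singleton, List.take_of_length_le (le_of_eq hp')]
  | succ k ih =>
    intro w' hw p hp
    have hsplit : (k+1+1) * w' = w' + (k+1) * w' := by ring
    have hkpos : 0 < (k+1) * w' := Nat.mul_pos (Nat.succ_pos k) hw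
    have hple : p.length = w' + (k+1) * w' := by rw [hp]; ring
    rw [hsplit, List.range_add, List.map_append, List.flatten_append, List.map_map]
    simp only [Function.comp_def]
    have hlenT : (p.take w').length = w' := by
      rw [List.length_take]; omega
    have hneT : p.take w' ≠ [] := by
      intro he; rw [he] at hlenT; simp at hlenT; omega
    -- first row
    have hrow1 : ((List.range w').map (fun i => pvHexL (p.getD i 0)
          ++ (if i < w' + (k+1) * w' - 1 then [',', ' '] else [])
          ++ (if (i+1) % w' = 0 then ['\n'] else []))).flatten
        = pvRowJ (p.take w') ++ [',', ' '] ++ ['\n'] := by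
      have hcongr : ∀ i ∈ List.range w',
          pvHexL (p.getD i 0)
            ++ (if i < w' + (k+1) * w' - 1 then [',', ' '] else [])
            ++ (if (i+1) % w' = 0 then ['\n'] else [])
          = pvHexL ((p.take w').getD i 0)
            ++ (if i < w' - 1 then [',', ' '] else [',', ' '])
            ++ (if i = w' - 1 then ['\n'] else []) := by
        intro i hi
        have hiw : i < w' := List.mem_range.mp hi
        have e1 : i < w' + (k+1) * w' - 1 := by omega
        have e2 : ((i+1) % w' = 0) ↔ (i = w' - 1) := by
          constructor
          · intro hm
            have := Nat.le_of_dvd (by omega) (Nat.dvd_of_mod_eq_zero hm); omega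
          · intro he
            have hh : i + 1 = w' := by omega
            simp [hh]
        rw [pv_getD_take p w' i 0 hiw, if_pos e1, ite_self, if_congr e2 rfl rfl]
      rw [List.map_congr_left hcongr]
      have hrc := pv_rowCore (p.take w') [',', ' '] hneT
      rw [hlenT] at hrc
      exact hrc
    rw [hrow1]
    -- remaining rows, shifted by w'
    have hshift : ∀ i ∈ List.range ((k+1) * w'),
        pvHexL (p.getD (w' + i) 0)
          ++ (if w' + i < w' + (k+1) * w' - 1 then [',', ' '] else [])
          ++ (if (w' + i + 1) % w' = 0 then ['\n'] else [])
        = pvHexL ((p.drop w').getD i 0)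
          ++ (if i < (k+1) * w' - 1 then [',', ' '] else [])
          ++ (if (i+1) % w' = 0 then ['\n'] else []) := by
      intro i hi
      have e1 : p.getD (w' + i) 0 = (p.drop w').getD i 0 := (pv_getD_drop p w' i 0).symm
      have e2 : (w' + i < w' + (k+1) * w' - 1) ↔ (i < (k+1) * w' - 1) := by omega
      have e3 : (w' + i + 1) % w' = (i + 1) % w' := by
        rw [Nat.add_assoc]; exact Nat.add_mod_left w' (i+1)
      rw [e1, e3, if_congr e2 rfl rfl]
    rw [List.map_congr_left hshift]
    have hdlen : (p.drop w').length = (k+1) * w' := by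
      rw [List.length_drop]; omega
    rw [ih w' hw (p.drop w') hdlen]
    -- assemble the right-hand side
    have hrhs : (List.range (k+1+1)).map (fun r => pvRowJ ((p.drop (r * w')).take w'))
        = pvRowJ (p.take w') :: (List.range (k+1)).map (fun r => pvRowJ (((p.drop w').drop (r * w')).take w')) := by
      have h11 : (k+1+1) = 1 + (k+1) := by omega
      rw [h11, List.range_add, List.map_append, List.map_map]
      simp only [List.range_one, List.map_cons, List.map_nil, Nat.zero_mul, List.drop_zero,
        Function.comp_def]
      rw [List.singleton_append]
      congr 1
      apply List.map_congr_left
      intro r hr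
      rw [List.drop_drop]
      congr 2
      ring
    rw [hrhs, pv_join_cons_ne _ _ _ (by simp)]
    simp

theorem pv_toList_empty : ("" : String).toList = [] := rfl

-- A's loop over range(n), as one flat list of per-byte chunks (String level -> char-list level)
theorem pv_foldA3 (d : List Int) (nn ww : Int) (l : List Nat) (a : String) :
    (l.foldl (fun (acc : String) (j : Nat) =>
        if PySem.Int.mod ((j : Int) + 1) ww = 0
        then (if (j : Int) < nn - 1 then acc ++ pvHex (PySem.List.pyGetD d ((j : Int) + 3) 0) ++ ", "
              else acc ++ pvHex (PySem.List.pyGetD d ((j : Int) + 3) 0)) ++ "\n"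
        else (if (j : Int) < nn - 1 then acc ++ pvHex (PySem.List.pyGetD d ((j : Int) + 3) 0) ++ ", "
              else acc ++ pvHex (PySem.List.pyGetD d ((j : Int) + 3) 0))) a).toList
      = a.toList ++ (l.map (fun (j : Nat) => pvHexL (PySem.List.pyGetD d ((j : Int) + 3) 0)
          ++ (if (j : Int) < nn - 1 then [',', ' '] else [])
          ++ (if PySem.Int.mod ((j : Int) + 1) ww = 0 then ['\n'] else []))).flatten := by
  induction l generalizing a with
  | nil => simp
  | cons x t ihl =>
    rw [List.foldl_cons, ihl]
    split_ifs with h1 h2 h3 <;>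
      simp_all [String.toList_append, pvHex, pv_toList_comma, pv_toList_nl, String.toList_ofList]

theorem pv_toList_commanl : (", \n").toList = [',', ' ', '\n'] := rfl

theorem pv_assemble (d : List Int) (name : String) (k w' : Nat) (hw : 0 < w')
    (hH : PySem.List.pyGetD d 1 0 = ((k+1 : Nat) : Int))
    (hW : PySem.List.pyGetD d 2 0 = ((w' : Nat) : Int))
    (hfit : (k+1)*w' + 3 ≤ d.length) :
    create_c_array_py d name = create_c_array_py_alt d name := by
  apply String.toList_inj.mp
  have hNcast : (((k+1 : Nat) : Int)) * ((w' : Nat) : Int) = (((k+1)*w' : Nat) : Int) := by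
    push_cast; ring
  have hpos : (0 : Int) < (((k+1)*w' : Nat) : Int) := by
    have := Nat.mul_pos (Nat.succ_pos k) hw; exact_mod_cast this
  simp only [create_c_array_py, create_c_array_py_alt, hH, hW, hNcast, if_pos hpos,
    PySem.List.pyRange_zero_natCast, List.foldl_map, String.toList_append]
  rw [pv_foldA3]
  -- A side: switch each loop-body chunk to its Nat/payload form
  have hplen : ((d.drop 3).take ((k+1)*w')).length = (k+1)*w' := by
    simp only [List.length_take, List.length_drop]
    omega
  have hcongr : ∀ j ∈ List.range ((k+1)*w'),
      pvHexL (PySem.List.pyGetD d ((j : Int) + 3) 0)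
        ++ (if (j : Int) < (((k+1)*w' : Nat) : Int) - 1 then [',', ' '] else [])
        ++ (if PySem.Int.mod ((j : Int) + 1) ((w' : Nat) : Int) = 0 then ['\n'] else [])
      = pvHexL (((d.drop 3).take ((k+1)*w')).getD j 0)
        ++ (if j < (k+1)*w' - 1 then [',', ' '] else [])
        ++ (if (j+1) % w' = 0 then ['\n'] else []) := by
    intro j hj
    have hjn : j < (k+1)*w' := List.mem_range.mp hj
    have e0 : PySem.List.pyGetD d ((j : Int) + 3) 0 = ((d.drop 3).take ((k+1)*w')).getD j 0 := by
      rw [pv_getD_take _ _ _ _ hjn, pv_getD_drop]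
      have e : ((j : Int) + 3) = (((3 + j : Nat)) : Int) := by push_cast; ring
      rw [e, PySem.List.pyGetD_natCast]
    have e1 : ((j : Int) < (((k+1)*w' : Nat) : Int) - 1) ↔ (j < (k+1)*w' - 1) := by omega
    have e2 : (PySem.Int.mod ((j : Int) + 1) ((w' : Nat) : Int) = 0) ↔ ((j+1) % w' = 0) := by
      have e : ((j : Int) + 1) = (((j + 1 : Nat)) : Int) := by push_cast; ring
      rw [e, PySem.Int.mod_natCast]
      exact Int.natCast_eq_zero
    rw [e0, if_congr e1 rfl rfl, if_congr e2 rfl rfl]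
  rw [List.map_congr_left hcongr, pv_main k w' hw _ hplen]
  -- B side: payload and row slices
  have hslice : PySem.List.slice d (some 3) (some (3 + (((k+1)*w' : Nat) : Int)))
      = (d.drop 3).take ((k+1)*w') := by
    simpa using PySem.List.slice_natCast_add d 3 ((k+1)*w')
  rw [hslice]
  simp only [List.map_map, Function.comp_def]
  have hrows : ∀ r ∈ List.range (k+1),
      PySem.Str.join ", " (List.map pvHex (PySem.List.slice ((d.drop 3).take ((k+1)*w'))
          (some ((r : Int) * ((w' : Nat) : Int))) (some (((r : Int) + 1) * ((w' : Nat) : Int)))))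
      = PySem.Str.join ", " (List.map pvHex ((((d.drop 3).take ((k+1)*w')).drop (r*w')).take w')) := by
    intro r hr
    have c1 : ((r : Int) * ((w' : Nat) : Int)) = (((r*w' : Nat)) : Int) := by push_cast; ring
    have c2 : (((r : Int) + 1) * ((w' : Nat) : Int)) = (((r*w' : Nat)) : Int) + ((w' : Nat) : Int) := by
      push_cast; ring
    rw [c1, c2, PySem.List.slice_natCast_add]
  rw [List.map_congr_left hrows]
  -- flatten both sides to char lists
  simp only [PySem.Str.toList_join, pv_toList_empty, pv_join_empty_sep, List.map_map,
    Function.comp_def, List.map_append, String.toList_append, pvHex, String.toList_ofList,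
    pv_toList_comma, pv_toList_commanl, pv_toList_nl, pvRowJ, List.map_cons, List.map_nil,
    List.flatten_cons, List.flatten_nil, List.flatten_append, List.append_nil]
  simp [List.append_assoc]

-- ===== VERDICT (by name: the statement is the Claim_ definition above) =====
theorem create_c_array_py_spec : Claim_equal_create_c_array_py := by
  intro d name _dom pre
  unfold Spec_create_c_array_py
  obtain ⟨hlen3, himp⟩ := pre
  by_cases hn : 0 < PySem.List.pyGetD d 1 0 * PySem.List.pyGetD d 2 0
  case neg =>
    apply String.toList_inj.mp
    have hr : PySem.List.pyRange 0 (PySem.List.pyGetD d 1 0 * PySem.List.pyGetD d 2 0) = [] :=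
      PySem.List.pyRange_one_eq_nil (by omega)
    simp only [create_c_array_py, create_c_array_py_alt, hr, List.foldl_nil, if_neg hn]
    simp [PySem.Str.toList_join, pv_join_empty_sep, String.toList_append, List.append_assoc]
  case pos =>
    obtain ⟨hwpos, hfit⟩ := himp hn
    have hhpos : 0 < PySem.List.pyGetD d 1 0 := by nlinarith
    have hmul : ((((PySem.List.pyGetD d 1 0).toNat - 1 + 1) * (PySem.List.pyGetD d 2 0).toNat : Nat) : Int)
        = PySem.List.pyGetD d 1 0 * PySem.List.pyGetD d 2 0 := by
      have e1 : ((PySem.List.pyGetD d 1 0).toNat - 1 + 1 : Nat) = (PySem.List.pyGetD d 1 0).toNat := by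
        omega
      rw [e1]
      push_cast [Int.toNat_of_nonneg hhpos.le, Int.toNat_of_nonneg hwpos.le]
      ring
    exact pv_assemble d name ((PySem.List.pyGetD d 1 0).toNat - 1) ((PySem.List.pyGetD d 2 0).toNat)
      (by omega) (by omega) (by omega) (by omega)
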